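-- pv_equiv track=rewrite | github.com/ibloise/FIS_opentrons_protocols | tools/FIS_opentrons_tools/distribute_tools.py | split_quadrants
-- ===== SOURCE A (Python) =====
-- def split_list(x, n):
--     #Obtained from: https://stackoverflow.com/questions/9671224/split-a-python-list-into-other-sublists-i-e-smaller-lists
--     return [x[idx:idx+n] for idx in range(0, len(x), n)]
--
-- def increase_idx(idx, second_idx, lap):
--     idx += 1
--     if idx >= lap:
--         second_idx += 1
--         idx = 0
--     return (idx, second_idx)
--
-- def split_quadrants(big_labware_dims, labware_dim_relations, small_labware_slots, by_row =  True):
--     '''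
--     Distribuye las filas y columnas de los cuadrantes
--     '''
--     destiny_dict = {}
--     row_idx = 0
--     col_idx = 0
--     row_list = [x for x in range(big_labware_dims[0])]
--     col_list = [x for x in range(big_labware_dims[1])]
--     rows = split_list(row_list, int(len(row_list)/labware_dim_relations[0]))
--     cols = split_list(col_list, int(len(col_list)/labware_dim_relations[1]))
--     for slot in small_labware_slots:
--         destiny_dict[slot] = (rows[row_idx], cols[col_idx])
--         if by_row:
--             row_idx, col_idx = increase_idx(row_idx, col_idx, labware_dim_relations[0])
--         else:
--             col_idx, row_idx = increase_idx(col_idx, row_idx, labware_dim_relations[1])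
--     return destiny_dict
-- ===== SOURCE B (Python) =====
-- def split_list(x, n):
--     return [x[idx:idx+n] for idx in range(0, len(x), n)]
--
-- def split_quadrants(big_labware_dims, labware_dim_relations, small_labware_slots, by_row=True):
--     '''
--     Distribuye las filas y columnas de los cuadrantes
--     '''
--     row_list = [x for x in range(big_labware_dims[0])]
--     col_list = [x for x in range(big_labware_dims[1])]
--     rows = split_list(row_list, int(len(row_list) / labware_dim_relations[0]))
--     cols = split_list(col_list, int(len(col_list) / labware_dim_relations[1]))
--     destiny_dict = {}
--     lap = labware_dim_relations[0] if by_row else labware_dim_relations[1]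
--     for i, slot in enumerate(small_labware_slots):
--         if by_row:
--             row_idx, col_idx = i % lap, i // lap
--         else:
--             col_idx, row_idx = i % lap, i // lap
--         destiny_dict[slot] = (rows[row_idx], cols[col_idx])
--     return destiny_dict
-- ===== Notes on version B (the rewrite author's own statement) =====
-- stated objective: simpler
-- what changed: B drops the increase_idx helper and the two running counters threaded through the loop: it iterates with enumerate and computes the row/column block indices in closed form as i % lap and i // lap (roles swapped for by_row=False).
import Mathlib
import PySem

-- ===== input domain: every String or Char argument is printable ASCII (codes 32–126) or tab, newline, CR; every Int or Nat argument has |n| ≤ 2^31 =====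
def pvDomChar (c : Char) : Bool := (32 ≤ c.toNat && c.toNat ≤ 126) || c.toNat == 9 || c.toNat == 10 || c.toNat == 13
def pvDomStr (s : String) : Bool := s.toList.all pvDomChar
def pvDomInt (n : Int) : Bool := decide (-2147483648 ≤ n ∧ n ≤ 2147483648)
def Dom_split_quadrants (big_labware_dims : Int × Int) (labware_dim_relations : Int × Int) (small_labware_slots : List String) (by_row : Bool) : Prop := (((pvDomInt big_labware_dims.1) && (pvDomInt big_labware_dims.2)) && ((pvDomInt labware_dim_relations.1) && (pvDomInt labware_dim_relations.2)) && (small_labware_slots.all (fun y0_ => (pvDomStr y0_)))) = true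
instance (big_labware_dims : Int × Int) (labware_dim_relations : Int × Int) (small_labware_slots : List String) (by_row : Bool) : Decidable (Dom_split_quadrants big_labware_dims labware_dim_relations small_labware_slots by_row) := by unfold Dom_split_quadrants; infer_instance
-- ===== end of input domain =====

-- B replaces A's increase_idx helper and its two running counters by closed-form
-- block indices i % lap and i // lap over enumerate (objective: simpler; same cost).

-- ===== PORT A =====
-- split_list(x, n) = [x[idx:idx+n] for idx in range(0, len(x), n)]  (shared helper of both Pythons)
def pySplitList (x : List Int) (n : Int) : List (List Int) :=
  (PySem.List.pyRange 0 (x.length : Int) n).map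
    (fun idx => PySem.List.slice x (some idx) (some (idx + n)))

-- increase_idx(idx, second_idx, lap)
def increaseIdxA (idx second lap : Int) : Int × Int :=
  let idx := idx + 1
  if lap ≤ idx then (0, second + 1) else (idx, second)

-- int(len/rel) : float division + int() truncates toward zero; exact as truncdiv on |n| ≤ 2^31
def split_quadrants (big_labware_dims : Int × Int) (labware_dim_relations : Int × Int) (small_labware_slots : List String) (by_row : Bool) : List (String × List Int × List Int) :=
  let row_list := PySem.List.pyRange 0 big_labware_dims.1 1
  let col_list := PySem.List.pyRange 0 big_labware_dims.2 1
  let rows := pySplitList row_list (PySem.Int.truncdiv (row_list.length : Int) labware_dim_relations.1)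
  let cols := pySplitList col_list (PySem.Int.truncdiv (col_list.length : Int) labware_dim_relations.2)
  let fin := small_labware_slots.foldl
    (fun (st : PySem.Dict String (List Int × List Int) × Int × Int) slot =>
      -- rows[row_idx] / cols[col_idx]: IndexError (= out of range) is excluded by Pre_
      let d := st.1.insert slot (PySem.List.pyGetD rows st.2.1 [], PySem.List.pyGetD cols st.2.2 [])
      if by_row then
        let p := increaseIdxA st.2.1 st.2.2 labware_dim_relations.1
        (d, p.1, p.2)
      else
        let p := increaseIdxA st.2.2 st.2.1 labware_dim_relations.2
        (d, p.2, p.1))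
    (PySem.Dict.empty, 0, 0)
  fin.1.items

-- ===== PORT B =====
def split_quadrants_alt (big_labware_dims : Int × Int) (labware_dim_relations : Int × Int) (small_labware_slots : List String) (by_row : Bool) : List (String × List Int × List Int) :=
  let row_list := PySem.List.pyRange 0 big_labware_dims.1 1
  let col_list := PySem.List.pyRange 0 big_labware_dims.2 1
  let rows := pySplitList row_list (PySem.Int.truncdiv (row_list.length : Int) labware_dim_relations.1)
  let cols := pySplitList col_list (PySem.Int.truncdiv (col_list.length : Int) labware_dim_relations.2)
  let lap := if by_row then labware_dim_relations.1 else labware_dim_relations.2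
  ((PySem.List.enumerate small_labware_slots 0).foldl
    (fun (d : PySem.Dict String (List Int × List Int)) p =>
      let row_idx := if by_row then PySem.Int.mod p.1 lap else PySem.Int.floordiv p.1 lap
      let col_idx := if by_row then PySem.Int.floordiv p.1 lap else PySem.Int.mod p.1 lap
      d.insert p.2 (PySem.List.pyGetD rows row_idx [], PySem.List.pyGetD cols col_idx []))
    PySem.Dict.empty).items

-- ===== PRECONDITION & SPEC =====
-- Pre_ = exactly the inputs where Python A returns: chunk sizes int(len/rel) nonzero
-- (else split_list's range(0, len, 0) raises ValueError), and for a nonempty slot list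
-- positive relations with the last second-index inside the other axis's chunk list
-- (else rows[...]/cols[...] raises IndexError).
def Pre_split_quadrants (big_labware_dims : Int × Int) (labware_dim_relations : Int × Int) (small_labware_slots : List String) (by_row : Bool) : Prop :=
  let L0 := max big_labware_dims.1 0
  let L1 := max big_labware_dims.2 0
  let n0 := PySem.Int.truncdiv L0 labware_dim_relations.1
  let n1 := PySem.Int.truncdiv L1 labware_dim_relations.2
  labware_dim_relations.1 ≠ 0 ∧ labware_dim_relations.2 ≠ 0 ∧ n0 ≠ 0 ∧ n1 ≠ 0 ∧
  (small_labware_slots = [] ∨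
    (0 < labware_dim_relations.1 ∧ 0 < labware_dim_relations.2 ∧
      (if by_row
       then ((small_labware_slots.length : Int) - 1) / labware_dim_relations.1 < (L1 + n1 - 1) / n1
       else ((small_labware_slots.length : Int) - 1) / labware_dim_relations.2 < (L0 + n0 - 1) / n0)))
instance (big_labware_dims : Int × Int) (labware_dim_relations : Int × Int) (small_labware_slots : List String) (by_row : Bool) : Decidable (Pre_split_quadrants big_labware_dims labware_dim_relations small_labware_slots by_row) := by unfold Pre_split_quadrants; infer_instance

def pvWitness_split_quadrants : (Int × Int) × (Int × Int) × List String × Bool :=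
  ((8, 12), (2, 3), ["a", "b", "c", "d", "e", "f"], true)

def Spec_split_quadrants (big_labware_dims : Int × Int) (labware_dim_relations : Int × Int) (small_labware_slots : List String) (by_row : Bool) (out : List (String × List Int × List Int)) : Prop := out = split_quadrants_alt big_labware_dims labware_dim_relations small_labware_slots by_row
instance (big_labware_dims : Int × Int) (labware_dim_relations : Int × Int) (small_labware_slots : List String) (by_row : Bool) (out : List (String × List Int × List Int)) : Decidable (Spec_split_quadrants big_labware_dims labware_dim_relations small_labware_slots by_row out) := by unfold Spec_split_quadrants; infer_instance

-- ===== CLAIM (what is proved, stated in full; the proofs are below) =====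
def Claim_equal_split_quadrants : Prop := ∀ (big_labware_dims : Int × Int) (labware_dim_relations : Int × Int) (small_labware_slots : List String) (by_row : Bool), Dom_split_quadrants big_labware_dims labware_dim_relations small_labware_slots by_row → Pre_split_quadrants big_labware_dims labware_dim_relations small_labware_slots by_row → Spec_split_quadrants big_labware_dims labware_dim_relations small_labware_slots by_row (split_quadrants big_labware_dims labware_dim_relations small_labware_slots by_row)

-- ===== LEMMAS AND PROOFS =====

-- One step of A's counter bookkeeping equals the closed form advancing from i to i+1.
theorem increaseIdxA_closed (i lap : Int) (hlap : 0 < lap) :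
    increaseIdxA (PySem.Int.mod i lap) (PySem.Int.floordiv i lap) lap
      = (PySem.Int.mod (i + 1) lap, PySem.Int.floordiv (i + 1) lap) := by
  rw [PySem.Int.mod_eq_emod_of_pos hlap, PySem.Int.mod_eq_emod_of_pos hlap,
      PySem.Int.floordiv_eq_ediv_of_pos hlap, PySem.Int.floordiv_eq_ediv_of_pos hlap]
  have hik : lap * (i / lap) + i % lap = i := Int.mul_ediv_add_emod i lap
  have hr0 : 0 ≤ i % lap := Int.emod_nonneg i (by omega)
  have hrlt : i % lap < lap := Int.emod_lt_of_pos i hlap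
  unfold increaseIdxA
  by_cases hcase : lap ≤ i % lap + 1
  · -- i % lap = lap - 1 : wrap around
    have hi1 : i + 1 = lap * (i / lap + 1) := by rw [mul_add, mul_one]; omega
    simp only [if_pos hcase]
    rw [Prod.mk.injEq]
    have hm : (i + 1) % lap = 0 := by rw [hi1]; exact Int.mul_emod_right _ _
    have hd : (i + 1) / lap = i / lap + 1 := by
      rw [hi1]; exact Int.mul_ediv_cancel_left _ (by omega)
    exact ⟨hm.symm, hd.symm⟩
  · -- no wrap
    have h1 : i + 1 = (i % lap + 1) + lap * (i / lap) := by omega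
    simp only [if_neg hcase]
    rw [Prod.mk.injEq]
    have hm : (i + 1) % lap = i % lap + 1 := by
      rw [h1, Int.add_mul_emod_self_left]
      exact Int.emod_eq_of_lt (by omega) (by omega)
    have hd : (i + 1) / lap = i / lap := by
      rw [h1, Int.add_mul_ediv_left _ _ (by omega : lap ≠ 0),
          Int.ediv_eq_zero_of_lt (by omega) (by omega)]
      ring
    exact ⟨hm.symm, hd.symm⟩

-- A's fold (by_row = true roles) started at closed-form counters equals B's enumerate fold.
theorem loop_eq_true (rows cols : List (List Int)) (lap : Int) (hlap : 0 < lap) :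
    ∀ (slots : List String) (d : PySem.Dict String (List Int × List Int)) (i : Int),
      (slots.foldl
        (fun (st : PySem.Dict String (List Int × List Int) × Int × Int) slot =>
          let d' := st.1.insert slot (PySem.List.pyGetD rows st.2.1 [], PySem.List.pyGetD cols st.2.2 [])
          let p := increaseIdxA st.2.1 st.2.2 lap
          (d', p.1, p.2))
        (d, PySem.Int.mod i lap, PySem.Int.floordiv i lap)).1
      = (PySem.List.enumerate slots i).foldl
          (fun d' p => d'.insert p.2 (PySem.List.pyGetD rows (PySem.Int.mod p.1 lap) [],
                                      PySem.List.pyGetD cols (PySem.Int.floordiv p.1 lap) []))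
          d := by
  intro slots
  induction slots with
  | nil => intro d i; simp [PySem.List.enumerate_nil]
  | cons s rest ih =>
    intro d i
    rw [PySem.List.enumerate_cons]
    simp only [List.foldl_cons]
    rw [increaseIdxA_closed i lap hlap]
    exact ih _ (i + 1)

-- Same with the roles of the two counters swapped (by_row = false).
theorem loop_eq_false (rows cols : List (List Int)) (lap : Int) (hlap : 0 < lap) :
    ∀ (slots : List String) (d : PySem.Dict String (List Int × List Int)) (i : Int),
      (slots.foldl
        (fun (st : PySem.Dict String (List Int × List Int) × Int × Int) slot =>
          let d' := st.1.insert slot (PySem.List.pyGetD rows st.2.1 [], PySem.List.pyGetD cols st.2.2 [])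
          let p := increaseIdxA st.2.2 st.2.1 lap
          (d', p.2, p.1))
        (d, PySem.Int.floordiv i lap, PySem.Int.mod i lap)).1
      = (PySem.List.enumerate slots i).foldl
          (fun d' p => d'.insert p.2 (PySem.List.pyGetD rows (PySem.Int.floordiv p.1 lap) [],
                                      PySem.List.pyGetD cols (PySem.Int.mod p.1 lap) []))
          d := by
  intro slots
  induction slots with
  | nil => intro d i; simp [PySem.List.enumerate_nil]
  | cons s rest ih =>
    intro d i
    rw [PySem.List.enumerate_cons]
    simp only [List.foldl_cons]
    rw [increaseIdxA_closed i lap hlap]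
    exact ih _ (i + 1)

-- ===== VERDICT (by name: the statement is the Claim_ definition above) =====
theorem split_quadrants_spec : Claim_equal_split_quadrants := by
  intro bld ldr slots by_row _hdom hpre
  unfold Spec_split_quadrants split_quadrants split_quadrants_alt
  rcases hpre with ⟨h1, h2, _h3, _h4, hrest⟩
  rcases hrest with hnil | ⟨hp1, hp2, _hbound⟩
  · subst hnil; cases by_row <;> rfl
  · cases by_row
    · -- by_row = false, lap = ldr.2
      simp only [Bool.false_eq_true, if_false]
      have h := loop_eq_false
        (pySplitList (PySem.List.pyRange 0 bld.1 1) (PySem.Int.truncdiv ((PySem.List.pyRange 0 bld.1 1).length : Int) ldr.1))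
        (pySplitList (PySem.List.pyRange 0 bld.2 1) (PySem.Int.truncdiv ((PySem.List.pyRange 0 bld.2 1).length : Int) ldr.2))
        ldr.2 hp2 slots PySem.Dict.empty 0
      rw [show PySem.Int.mod 0 ldr.2 = 0 by
            rw [PySem.Int.mod_eq_emod_of_pos hp2]; simp,
          show PySem.Int.floordiv 0 ldr.2 = 0 by
            rw [PySem.Int.floordiv_eq_ediv_of_pos hp2]; simp] at h
      rw [h]
    · -- by_row = true, lap = ldr.1
      simp only [if_true]
      have h := loop_eq_true
        (pySplitList (PySem.List.pyRange 0 bld.1 1) (PySem.Int.truncdiv ((PySem.List.pyRange 0 bld.1 1).length : Int) ldr.1))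
        (pySplitList (PySem.List.pyRange 0 bld.2 1) (PySem.Int.truncdiv ((PySem.List.pyRange 0 bld.2 1).length : Int) ldr.2))
        ldr.1 hp1 slots PySem.Dict.empty 0
      rw [show PySem.Int.mod 0 ldr.1 = 0 by
            rw [PySem.Int.mod_eq_emod_of_pos hp1]; simp,
          show PySem.Int.floordiv 0 ldr.1 = 0 by
            rw [PySem.Int.floordiv_eq_ediv_of_pos hp1]; simp] at h
      rw [h]
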